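-- pv_equiv track=rewrite | github.com/a0960211197/ROItemSearchApp | ItemSearchApp.py | calculate_stat_points
-- ===== SOURCE A (Python) =====
-- def calculate_stat_points(level: int, transcendent: bool = False) -> int:
--     pt = 100 if transcendent else 100 - 52
--     for i in range(1, level):
--         if i < 100:
--             pt += i // 5 + 3
--         elif i <= 150:
--             pt += i // 10 + 13
--         elif i <= 185:
--             pt += 28 + (i - 150) // 7
--         elif i < 200:
--             pt += 33 + (i - 185) // 7
--     return pt
-- ===== SOURCE B (Python) =====
-- def calculate_stat_points(level: int, transcendent: bool = False) -> int:
--     # Closed-form: sum each fixed level band with a floor-division sum formula, O(1).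
--     def tri(n, d):
--         # sum of i//d for i in range(n), n >= 0
--         q, r = divmod(n, d)
--         return d * q * (q - 1) // 2 + r * q
--
--     def seg(lo, hi, off, d, c):
--         # sum of (i-off)//d + c over i in [lo, min(hi, level-1)]
--         top = min(hi, level - 1)
--         if top < lo:
--             return 0
--         return tri(top - off + 1, d) - tri(lo - off, d) + c * (top - lo + 1)
--
--     base = 100 if transcendent else 48
--     return (base
--             + seg(1, 99, 0, 5, 3)
--             + seg(100, 150, 0, 10, 13)
--             + seg(151, 185, 150, 7, 28)
--             + seg(186, 199, 185, 7, 33))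
-- ===== Notes on version B (the rewrite author's own statement) =====
-- stated objective: faster
-- what changed: Replaces the per-level accumulation loop by closed-form piecewise arithmetic: each fixed level band is summed with a floor-division sum formula (sum of i//d over a range), so the result is computed in O(1).
import Mathlib
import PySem

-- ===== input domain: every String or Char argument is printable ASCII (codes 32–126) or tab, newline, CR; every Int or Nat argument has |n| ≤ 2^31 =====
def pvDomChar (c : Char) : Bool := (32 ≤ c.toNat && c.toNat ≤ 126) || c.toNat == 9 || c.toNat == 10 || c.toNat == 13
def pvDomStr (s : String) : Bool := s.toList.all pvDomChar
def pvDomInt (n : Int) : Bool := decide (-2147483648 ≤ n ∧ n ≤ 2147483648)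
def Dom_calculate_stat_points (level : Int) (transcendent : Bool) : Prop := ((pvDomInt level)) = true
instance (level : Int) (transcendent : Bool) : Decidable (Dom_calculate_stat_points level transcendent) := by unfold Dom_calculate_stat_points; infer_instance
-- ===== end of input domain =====

-- B replaces A's per-level loop by closed-form band sums (floor-division sum formulas), O(1) instead of O(level).

-- ===== PORT A =====
def calculate_stat_points (level : Int) (transcendent : Bool) : Int :=
  let pt : Int := if transcendent then 100 else 100 - 52
  (PySem.List.pyRange 1 level 1).foldl (fun pt i =>
    if i < 100 then pt + (PySem.Int.floordiv i 5 + 3)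
    else if i ≤ 150 then pt + (PySem.Int.floordiv i 10 + 13)
    else if i ≤ 185 then pt + (28 + PySem.Int.floordiv (i - 150) 7)
    else if i < 200 then pt + (33 + PySem.Int.floordiv (i - 185) 7)
    else pt) pt

-- ===== PORT B =====
-- sum of i//d for i in range(n), n ≥ 0
def pvTri (n d : Int) : Int :=
  let q := PySem.Int.floordiv n d
  let r := PySem.Int.mod n d
  PySem.Int.floordiv (d * q * (q - 1)) 2 + r * q

-- sum of (i-off)//d + c over i in [lo, min(hi, level-1)]
def pvSeg (level lo hi off d c : Int) : Int :=
  let top := min hi (level - 1)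
  if top < lo then 0
  else pvTri (top - off + 1) d - pvTri (lo - off) d + c * (top - lo + 1)

def calculate_stat_points_alt (level : Int) (transcendent : Bool) : Int :=
  let base : Int := if transcendent then 100 else 48
  base + pvSeg level 1 99 0 5 3 + pvSeg level 100 150 0 10 13
       + pvSeg level 151 185 150 7 28 + pvSeg level 186 199 185 7 33

-- ===== PRECONDITION & SPEC =====
def Spec_calculate_stat_points (level : Int) (transcendent : Bool) (out : Int) : Prop := out = calculate_stat_points_alt level transcendent
instance (level : Int) (transcendent : Bool) (out : Int) : Decidable (Spec_calculate_stat_points level transcendent out) := by unfold Spec_calculate_stat_points; infer_instance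

-- ===== CLAIM (what is proved, stated in full; the proofs are below) =====
def Claim_equal_calculate_stat_points : Prop := ∀ (level : Int) (transcendent : Bool), Dom_calculate_stat_points level transcendent → Spec_calculate_stat_points level transcendent (calculate_stat_points level transcendent)

-- ===== LEMMAS AND PROOFS =====

-- both sides agree on all levels 0..200 (checked by the kernel)
set_option maxRecDepth 4000 in
theorem pv_eq_small : ∀ n : Nat, n < 201 → ∀ t : Bool,
    calculate_stat_points (n : Int) t = calculate_stat_points_alt (n : Int) t := by
  decide

theorem pv_alt_nonpos (level : Int) (t : Bool) (h : level ≤ 0) :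
    calculate_stat_points_alt level t = (if t then 100 else 48) := by
  unfold calculate_stat_points_alt pvSeg
  rw [if_pos (show min (99:Int) (level-1) < 1 by omega),
      if_pos (show min (150:Int) (level-1) < 100 by omega),
      if_pos (show min (185:Int) (level-1) < 151 by omega),
      if_pos (show min (199:Int) (level-1) < 186 by omega)]
  ring

theorem pv_a_nonpos (level : Int) (t : Bool) (h : level ≤ 0) :
    calculate_stat_points level t = (if t then 100 else 48) := by
  unfold calculate_stat_points
  rw [PySem.List.pyRange_one_eq_nil (by omega)]
  cases t <;> rfl

theorem pv_foldl_big (xs : List Int) (hxs : ∀ i ∈ xs, (200:Int) ≤ i) (x : Int) :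
    xs.foldl (fun pt i =>
      if i < 100 then pt + (PySem.Int.floordiv i 5 + 3)
      else if i ≤ 150 then pt + (PySem.Int.floordiv i 10 + 13)
      else if i ≤ 185 then pt + (28 + PySem.Int.floordiv (i - 150) 7)
      else if i < 200 then pt + (33 + PySem.Int.floordiv (i - 185) 7)
      else pt) x = x := by
  induction xs generalizing x with
  | nil => rfl
  | cons a l ih =>
    have ha : (200:Int) ≤ a := hxs a (List.mem_cons_self ..)
    simp only [List.foldl_cons]
    rw [if_neg (by omega), if_neg (by omega), if_neg (by omega), if_neg (by omega)]
    exact ih (fun i hi => hxs i (List.mem_cons_of_mem _ hi)) x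

theorem pv_a_big (level : Int) (t : Bool) (h : 200 ≤ level) :
    calculate_stat_points level t = calculate_stat_points 200 t := by
  unfold calculate_stat_points
  rw [PySem.List.pyRange_one_append 1 200 level (by omega) (by omega), List.foldl_append]
  rw [pv_foldl_big _ (fun i hi => ((PySem.List.mem_pyRange_one).mp hi).1)]

theorem pv_alt_big (level : Int) (t : Bool) (h : 200 ≤ level) :
    calculate_stat_points_alt level t = calculate_stat_points_alt 200 t := by
  unfold calculate_stat_points_alt pvSeg
  rw [min_eq_left (by omega : (99:Int) ≤ level - 1), min_eq_left (by omega : (150:Int) ≤ level - 1),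
      min_eq_left (by omega : (185:Int) ≤ level - 1), min_eq_left (by omega : (199:Int) ≤ level - 1)]
  norm_num

-- ===== VERDICT (by name: the statement is the Claim_ definition above) =====
theorem calculate_stat_points_spec : Claim_equal_calculate_stat_points := by
  intro level t _
  unfold Spec_calculate_stat_points
  by_cases h0 : level ≤ 0
  · rw [pv_a_nonpos level t h0, pv_alt_nonpos level t h0]
  · by_cases h2 : level ≤ 200
    · have hn : level = ((level.toNat : Nat) : Int) := by omega
      rw [hn]
      exact pv_eq_small level.toNat (by omega) t
    · rw [pv_a_big level t (by omega), pv_alt_big level t (by omega)]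
      exact pv_eq_small 200 (by norm_num) t
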